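-- pv_equiv track=rewrite | github.com/foreandr/DataMarketplace | src/_workbc_jobs/jsonify.py | _first_url
-- ===== SOURCE A (Python) =====
-- def _first_url(row: list[str]) -> str:
--     for item in row:
--         if isinstance(item, str) and item.startswith("https://api-jobboard.workbc.ca/Print/Job?jobid="):
--             return item
--     for item in row:
--         if isinstance(item, str) and item.startswith("http"):
--             return item
--     for item in row:
--         if isinstance(item, str) and item.startswith("/search-and-prepare-job/find-jobs#/job-details/"):
--             return "https://www.workbc.ca" + item
--     return ""
-- ===== SOURCE B (Python) =====
-- _P1 = "https://api-jobboard.workbc.ca/Print/Job?jobid="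
-- _P3 = "/search-and-prepare-job/find-jobs#/job-details/"
--
-- def _first_url(row: list[str]) -> str:
--     t1 = t2 = t3 = None
--     for item in row:
--         if isinstance(item, str):
--             if item.startswith(_P1):
--                 if t1 is None:
--                     t1 = item
--             elif item.startswith("http"):
--                 if t2 is None:
--                     t2 = item
--             elif item.startswith(_P3):
--                 if t3 is None:
--                     t3 = item
--     if t1 is not None:
--         return t1
--     if t2 is not None:
--         return t2
--     if t3 is not None:
--         return "https://www.workbc.ca" + t3
--     return ""
-- ===== Notes on version B (the rewrite author's own statement) =====
-- stated objective: simpler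
-- what changed: Replaces A's three full scans of row with a single pass that classifies each item into one of three first-wins priority slots via if/elif and selects the best slot afterwards.
import Mathlib
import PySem

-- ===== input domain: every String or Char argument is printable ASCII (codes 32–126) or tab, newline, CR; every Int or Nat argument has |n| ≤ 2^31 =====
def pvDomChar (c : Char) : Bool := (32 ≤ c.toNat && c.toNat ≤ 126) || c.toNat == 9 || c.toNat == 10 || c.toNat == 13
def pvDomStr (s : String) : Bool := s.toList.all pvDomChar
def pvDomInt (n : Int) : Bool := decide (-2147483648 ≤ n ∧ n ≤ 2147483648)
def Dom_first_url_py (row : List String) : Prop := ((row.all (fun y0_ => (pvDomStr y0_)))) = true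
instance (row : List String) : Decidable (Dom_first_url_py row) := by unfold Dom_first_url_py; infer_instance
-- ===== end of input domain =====

-- B replaces A's three sequential scans of row with a single pass filling three
-- first-wins priority slots (simpler: one traversal, one if/elif classification).

def pvP1 : String := "https://api-jobboard.workbc.ca/Print/Job?jobid="
def pvP3 : String := "/search-and-prepare-job/find-jobs#/job-details/"

-- ===== PORT A =====
-- loop 1 of A: first item starting with the api-jobboard prefix
def firstUrlLoopA1 : List String → Option String
  | [] => none
  | item :: rest =>
    if PySem.Str.startswith item pvP1 then some item else firstUrlLoopA1 rest

-- loop 2 of A: first item starting with "http"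
def firstUrlLoopA2 : List String → Option String
  | [] => none
  | item :: rest =>
    if PySem.Str.startswith item "http" then some item else firstUrlLoopA2 rest

-- loop 3 of A: first item starting with the search prefix
def firstUrlLoopA3 : List String → Option String
  | [] => none
  | item :: rest =>
    if PySem.Str.startswith item pvP3 then some item else firstUrlLoopA3 rest

def first_url_py (row : List String) : String :=
  match firstUrlLoopA1 row with
  | some item => item
  | none =>
    match firstUrlLoopA2 row with
    | some item => item
    | none =>
      match firstUrlLoopA3 row with
      | some item => "https://www.workbc.ca" ++ item
      | none => ""

-- ===== PORT B =====
-- one step of B's single loop over row: if/elif classification, slot set only if unset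
def firstUrlStep (s : Option String × Option String × Option String) (item : String) :
    Option String × Option String × Option String :=
  if PySem.Str.startswith item pvP1 then
    (if s.1.isNone then (some item, s.2.1, s.2.2) else s)
  else if PySem.Str.startswith item "http" then
    (if s.2.1.isNone then (s.1, some item, s.2.2) else s)
  else if PySem.Str.startswith item pvP3 then
    (if s.2.2.isNone then (s.1, s.2.1, some item) else s)
  else s

def first_url_py_alt (row : List String) : String :=
  let s := row.foldl firstUrlStep (none, none, none)
  match s.1 with
  | some t1 => t1
  | none =>
    match s.2.1 with
    | some t2 => t2
    | none =>
      match s.2.2 with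
      | some t3 => "https://www.workbc.ca" ++ t3
      | none => ""

-- ===== PRECONDITION & SPEC =====
def Spec_first_url_py (row : List String) (out : String) : Prop := out = first_url_py_alt row
instance (row : List String) (out : String) : Decidable (Spec_first_url_py row out) := by unfold Spec_first_url_py; infer_instance

-- ===== CLAIM (what is proved, stated in full; the proofs are below) =====
def Claim_equal_first_url_py : Prop := ∀ (row : List String), Dom_first_url_py row → Spec_first_url_py row (first_url_py row)

-- ===== LEMMAS AND PROOFS =====

-- first item that B classifies into slot 2 (not api-prefixed, http-prefixed)
def firstUrlFindB2 : List String → Option String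
  | [] => none
  | item :: rest =>
    if ¬ PySem.Str.startswith item pvP1 ∧ PySem.Str.startswith item "http" then some item
    else firstUrlFindB2 rest

-- first item that B classifies into slot 3 (not http-prefixed, search-prefixed)
def firstUrlFindB3 : List String → Option String
  | [] => none
  | item :: rest =>
    if ¬ PySem.Str.startswith item "http" ∧ PySem.Str.startswith item pvP3 then some item
    else firstUrlFindB3 rest

lemma p1_imp_http (x : String) (h : PySem.Chars.startswith x.toList pvP1.toList = true) :
    PySem.Chars.startswith x.toList ['h', 't', 't', 'p'] = true := by
  rw [PySem.Chars.startswith_iff] at h ⊢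
  exact List.IsPrefix.trans (by decide) h

lemma fold_inv (row : List String) : ∀ (t1 t2 t3 : Option String),
    row.foldl firstUrlStep (t1, t2, t3) =
      ((t1.or (firstUrlLoopA1 row)), (t2.or (firstUrlFindB2 row)), (t3.or (firstUrlFindB3 row))) := by
  induction row with
  | nil => intro t1 t2 t3; simp [firstUrlLoopA1, firstUrlFindB2, firstUrlFindB3]
  | cons x r ih =>
    intro t1 t2 t3
    simp only [List.foldl_cons, firstUrlStep, firstUrlLoopA1, firstUrlFindB2, firstUrlFindB3]
    by_cases h1 : PySem.Chars.startswith x.toList pvP1.toList = true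
    · have h2 := p1_imp_http x h1
      cases t1 with
      | none => simp [h1, h2, ih]
      | some a => simp [h1, h2, ih]
    · replace h1 : PySem.Chars.startswith x.toList pvP1.toList = false := by
        simpa using h1
      by_cases h2 : PySem.Chars.startswith x.toList ['h', 't', 't', 'p'] = true
      · cases t2 with
        | none => simp [h1, h2, ih]
        | some a => simp [h1, h2, ih]
      · replace h2 : PySem.Chars.startswith x.toList ['h', 't', 't', 'p'] = false := by
          simpa using h2
        by_cases h3 : PySem.Chars.startswith x.toList pvP3.toList = true
        · cases t3 with
          | none => simp [h1, h2, h3, ih]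
          | some a => simp [h1, h2, h3, ih]
        · replace h3 : PySem.Chars.startswith x.toList pvP3.toList = false := by
            simpa using h3
          simp [h1, h2, h3, ih]

lemma findB2_eq (row : List String) (h : firstUrlLoopA1 row = none) :
    firstUrlFindB2 row = firstUrlLoopA2 row := by
  induction row with
  | nil => rfl
  | cons x r ih =>
    simp only [firstUrlLoopA1, PySem.Str.startswith_eq] at h
    by_cases h1 : PySem.Chars.startswith x.toList pvP1.toList = true
    · simp [h1] at h
    · replace h1 : PySem.Chars.startswith x.toList pvP1.toList = false := by simpa using h1
      simp only [h1, Bool.false_eq_true, if_false] at h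
      simp [firstUrlFindB2, firstUrlLoopA2, h1, ih h]

lemma findB3_eq (row : List String) (h : firstUrlLoopA2 row = none) :
    firstUrlFindB3 row = firstUrlLoopA3 row := by
  induction row with
  | nil => rfl
  | cons x r ih =>
    simp only [firstUrlLoopA2, PySem.Str.startswith_eq] at h
    by_cases h2 : PySem.Chars.startswith x.toList ['h', 't', 't', 'p'] = true
    · simp [h2] at h
    · replace h2 : PySem.Chars.startswith x.toList ['h', 't', 't', 'p'] = false := by
        simpa using h2
      simp [h2] at h
      simp [firstUrlFindB3, firstUrlLoopA3, h2, ih h]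

-- ===== VERDICT (by name: the statement is the Claim_ definition above) =====
theorem first_url_py_spec : Claim_equal_first_url_py := by
  intro row _
  unfold Spec_first_url_py first_url_py first_url_py_alt
  rw [fold_inv row none none none]
  simp only [Option.none_or]
  cases hA1 : firstUrlLoopA1 row with
  | some a => simp
  | none =>
    rw [findB2_eq row hA1]
    cases hA2 : firstUrlLoopA2 row with
    | some b => simp
    | none =>
      rw [findB3_eq row hA2]
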